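-- pv_equiv track=rewrite | github.com/career-prep/ucp-namer-latam-2026 | homework0/yonathan_abera/q0_ZeroSum.py | zeroSumContinued
-- ===== SOURCE A (Python) =====
-- def zeroSumContinued(nums):
--     counts = set()
--     pairs = 0
--     for number in nums:
--         if number not in counts:
--             counts.add(number)
--
--     for unique in counts:
--         complement = unique * -1
--         if complement in counts:
--             pairs += 1
--     return pairs
-- ===== SOURCE B (Python) =====
-- def zeroSumContinued(nums):
--     # Two-pointer scan over the sorted distinct values, closing in from both ends.
--     u = sorted(set(nums))
--     i, j = 0, len(u) - 1
--     pairs = 0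
--     while i <= j:
--         s = u[i] + u[j]
--         if s == 0:
--             pairs += 1 if i == j else 2
--             i += 1
--             j -= 1
--         elif s < 0:
--             i += 1
--         else:
--             j -= 1
--     return pairs
-- ===== Notes on version B (the rewrite author's own statement) =====
-- stated objective: alternative
-- what changed: Replaces A's hash-set complement-membership loop by sorting the distinct values and counting zero-sum partners with a two-pointer scan that closes in from both ends of the sorted list (no membership test at all).
import Mathlib
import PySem

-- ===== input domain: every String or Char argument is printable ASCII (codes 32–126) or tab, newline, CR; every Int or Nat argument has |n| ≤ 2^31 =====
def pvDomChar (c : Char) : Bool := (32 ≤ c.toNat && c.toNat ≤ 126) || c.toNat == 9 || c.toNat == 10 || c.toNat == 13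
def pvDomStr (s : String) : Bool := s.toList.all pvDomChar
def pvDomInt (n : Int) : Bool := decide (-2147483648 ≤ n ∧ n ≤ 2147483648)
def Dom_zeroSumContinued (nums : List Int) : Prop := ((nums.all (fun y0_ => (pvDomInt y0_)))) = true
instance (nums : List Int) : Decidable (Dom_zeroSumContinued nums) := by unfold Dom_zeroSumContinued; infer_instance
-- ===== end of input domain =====

-- B sorts the distinct values and counts zero-sum partners with a recursive two-pointer
-- scan from both ends, instead of A's per-element complement-membership loop (objective: alternative).

-- ===== PORT A =====
def zeroSumContinued (nums : List Int) : Int :=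
  let counts : PySem.Set Int :=
    nums.foldl (fun counts number =>
      if PySem.Set.contains counts number then counts
      else PySem.Set.add counts number) PySem.Set.empty
  counts.foldl (fun pairs unique =>
    if PySem.Set.contains counts (unique * -1) then pairs + 1 else pairs) 0

-- ===== PORT B =====
-- Source B's while loop over the two indices i, j (u[i]/u[j] in range whenever the
-- loop body runs, since 0 <= i <= j < len(u) there; pyGetD's default is never used).
def tpLoop (u : List Int) (i j pairs : Int) : Int :=
  if i ≤ j then
    let s := PySem.List.pyGetD u i 0 + PySem.List.pyGetD u j 0
    if s == 0 then
      tpLoop u (i + 1) (j - 1) (pairs + if i == j then 1 else 2)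
    else if s < 0 then tpLoop u (i + 1) j pairs
    else tpLoop u i (j - 1) pairs
  else pairs
  termination_by (j - i + 1).toNat
  decreasing_by all_goals omega

def zeroSumContinued_alt (nums : List Int) : Int :=
  let u := PySem.List.sorted (PySem.Set.ofList nums) (fun x => x) false
  tpLoop u 0 (PySem.List.len u - 1) 0

-- ===== PRECONDITION & SPEC =====
def Spec_zeroSumContinued (nums : List Int) (out : Int) : Prop := out = zeroSumContinued_alt nums
instance (nums : List Int) (out : Int) : Decidable (Spec_zeroSumContinued nums out) := by unfold Spec_zeroSumContinued; infer_instance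

-- ===== CLAIM (what is proved, stated in full; the proofs are below) =====
def Claim_equal_zeroSumContinued : Prop := ∀ (nums : List Int), Dom_zeroSumContinued nums → Spec_zeroSumContinued nums (zeroSumContinued nums)

-- ===== LEMMAS AND PROOFS =====

-- Proof-side model of the two-pointer loop: the same scan phrased on the list
-- segment u[i..j] itself ((x::t) is the segment, x = u[i], getLast = u[j]).
def tpZS : List Int → Int
  | [] => 0
  | x :: t =>
    let y := (x :: t).getLast (by simp)
    let s := x + y
    if s == 0 then (if t.isEmpty then 1 else 2) + tpZS t.dropLast
    else if s < 0 then tpZS t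
    else tpZS (x :: t).dropLast
  termination_by l => l.length
  decreasing_by
  all_goals simp only [List.length_cons, List.length_dropLast]
  all_goals omega

theorem take_tail_aux {α : Type} (l : List α) (n : Nat) : (l.take n).tail = l.tail.take (n-1) := by
  cases l <;> cases n <;> simp

theorem tpLoop_eq (u : List Int) : ∀ (fuel : Nat) (i j pairs : Int), (j - i + 1).toNat ≤ fuel →
    0 ≤ i → j < u.length →
    tpLoop u i j pairs = pairs + tpZS ((u.drop i.toNat).take ((j - i + 1).toNat)) := by
  intro fuel
  induction fuel with
  | zero =>
    intro i j pairs hf h0 hj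
    have hij : ¬ i ≤ j := by omega
    rw [tpLoop, if_neg hij]
    have : (j - i + 1).toNat = 0 := by omega
    simp [this, tpZS]
  | succ f ihf =>
    intro i j pairs hf h0 hj
    by_cases hij : i ≤ j
    · -- seg nonempty
      have hir : i < u.length := by omega
      have hlen : ((u.drop i.toNat).take ((j - i + 1).toNat)).length = (j - i + 1).toNat := by
        simp [List.length_take, List.length_drop]
        omega
      set seg := (u.drop i.toNat).take ((j - i + 1).toNat) with hseg
      have hsegne : seg ≠ [] := by
        intro hnil; rw [hnil] at hlen; simp at hlen; omega
      have hgetk : ∀ k : Nat, (hk : k < seg.length) → seg[k] = u[i.toNat + k]'(by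
          rw [hlen] at hk; omega) := by
        intro k hk
        simp [hseg]
      obtain ⟨x, t, hxt⟩ := List.exists_cons_of_ne_nil hsegne
      have hx : x = u[i.toNat]'(by omega) := by
        have := hgetk 0 (by rw [hlen]; omega)
        simpa [hxt] using this
      have hy : seg.getLast hsegne = u[j.toNat]'(by omega) := by
        rw [List.getLast_eq_getElem]
        rw [hgetk (seg.length - 1) (by rw [hlen]; omega)]
        congr 1
        rw [hlen]; omega
      -- window identities
      have htail : seg.tail = (u.drop (i.toNat + 1)).take ((j - i + 1).toNat - 1) := by
        rw [hseg, take_tail_aux, List.tail_drop]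
      have hsegdl : seg.dropLast = (u.drop i.toNat).take ((j - i + 1).toNat - 1) := by
        rw [List.dropLast_eq_take, hlen, hseg, List.take_take]
        congr 1
        omega
      have htdl : seg.tail.dropLast = (u.drop (i.toNat + 1)).take ((j - i + 1).toNat - 2) := by
        have hlt : seg.tail.length = (j - i + 1).toNat - 1 := by
          rw [List.length_tail, hlen]
        rw [List.dropLast_eq_take, hlt, htail, List.take_take]
        congr 1
        omega
      have hgi : PySem.List.pyGetD u i 0 = u[i.toNat]'(by omega) := by
        rw [PySem.List.pyGetD_eq_getElem] <;> omega
      have hgj : PySem.List.pyGetD u j 0 = u[j.toNat]'(by omega) := by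
        rw [PySem.List.pyGetD_eq_getElem] <;> omega
      have hy? : seg.getLast? = some (u[j.toNat]'(by omega)) := by
        rw [List.getLast?_eq_some_getLast hsegne, hy]
      have hygl : (x :: t).getLast (by simp) = u[j.toNat]'(by omega) := by
        rw [List.getLast_eq_iff_getLast?_eq_some, ← hxt]
        exact hy?
      have htp : tpZS seg =
          if (u[i.toNat]'(by omega)) + (u[j.toNat]'(by omega)) == 0 then
            (if t.isEmpty then 1 else 2) + tpZS t.dropLast
          else if (u[i.toNat]'(by omega)) + (u[j.toNat]'(by omega)) < 0 then tpZS t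
          else tpZS (x :: t).dropLast := by
        conv_lhs => rw [hxt, tpZS]
        rw [hygl, hx]
      have htseg : t = seg.tail := by rw [hxt]; rfl
      have htdl' : t.dropLast = seg.tail.dropLast := by rw [htseg]
      have hxtdl : (x :: t).dropLast = seg.dropLast := by rw [hxt]
      have hlt : t.length = (j - i + 1).toNat - 1 := by
        have h1 := hlen
        rw [hxt, List.length_cons] at h1
        omega
      have hempty : t.isEmpty = (i == j) := by
        by_cases hieq : i = j
        · have ht0 : t = [] := List.eq_nil_of_length_eq_zero (by omega)
          simp [ht0, hieq]
        · have htne : t ≠ [] := by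
            intro hnil
            rw [hnil] at hlt
            simp at hlt
            omega
          have h2 : t.isEmpty = false := by
            cases t
            · exact absurd rfl htne
            · rfl
          rw [h2]
          simp [hieq]
      rw [tpLoop, if_pos hij]
      simp only [hgi, hgj]
      rw [htp]
      by_cases hs0 : (u[i.toNat]'(by omega)) + (u[j.toNat]'(by omega)) = 0
      · simp only [hs0, beq_self_eq_true, if_pos]
        rw [ihf (i + 1) (j - 1) _ (by omega) (by omega) (by omega)]
        rw [htdl', htdl]
        rw [show ((i:Int)+1).toNat = i.toNat + 1 from by omega,
            show ((j:Int) - 1 - (i+1) + 1).toNat = (j - i + 1).toNat - 2 from by omega]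
        rw [hempty]
        by_cases hieq : i = j <;> simp [hieq] <;> ring
      · have hsne : ((u[i.toNat]'(by omega)) + (u[j.toNat]'(by omega)) == 0) = false := by
          simpa using hs0
        rw [hsne]
        simp only [Bool.false_eq_true, if_false]
        by_cases hslt : (u[i.toNat]'(by omega)) + (u[j.toNat]'(by omega)) < 0
        · rw [if_pos hslt, if_pos hslt]
          rw [ihf (i + 1) j _ (by omega) (by omega) hj]
          rw [htseg, htail]
          rw [show ((i:Int)+1).toNat = i.toNat + 1 from by omega,
              show ((j:Int) - (i+1) + 1).toNat = (j - i + 1).toNat - 1 from by omega]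
        · rw [if_neg hslt, if_neg hslt]
          rw [ihf i (j - 1) _ (by omega) h0 (by omega)]
          rw [hxtdl, hsegdl]
          rw [show ((j:Int) - 1 - i + 1).toNat = (j - i + 1).toNat - 1 from by omega]
    · rw [tpLoop, if_neg hij]
      have : (j - i + 1).toNat = 0 := by omega
      simp [this, tpZS]


-- A's first loop is exactly Set.ofList.
theorem counts_eq_ofList (nums : List Int) (acc : PySem.Set Int) :
    nums.foldl (fun counts number =>
      if PySem.Set.contains counts number then counts
      else PySem.Set.add counts number) acc = nums.foldl PySem.Set.add acc := by
  induction nums generalizing acc with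
  | nil => rfl
  | cons x xs ih =>
    simp only [List.foldl_cons]
    rw [ih]
    congr 1
    by_cases h : PySem.Set.contains acc x
    · rw [if_pos h, PySem.Set.add_eq_ite, if_pos ((PySem.Set.contains_iff acc x).mp h)]
    · rw [if_neg h]

-- A's counting loop is the length of a filter.
theorem count_loop (p : Int → Bool) (l : List Int) (acc : Int) :
    l.foldl (fun pairs u => if p u then pairs + 1 else pairs) acc
      = acc + ((l.filter p).length : Int) := by
  induction l generalizing acc with
  | nil => simp
  | cons x xs ih =>
    simp only [List.foldl_cons, List.filter_cons]
    by_cases h : p x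
    · rw [if_pos h, if_pos h, ih]
      simp only [List.length_cons]
      push_cast
      omega
    · rw [if_neg h, if_neg h, ih]

-- The two-pointer scan on a strictly increasing list counts the elements whose
-- negation is also in the list.
theorem tpZS_concat (x y : Int) (m : List Int) :
    tpZS (x :: (m ++ [y])) =
      if x + y == 0 then 2 + tpZS m
      else if x + y < 0 then tpZS (m ++ [y])
      else tpZS (x :: m) := by
  have hgl : (x :: (m ++ [y])).getLast (by simp) = y := by
    rw [List.getLast_eq_iff_getLast?_eq_some, List.getLast?_cons, List.getLast?_append]
    simp
  have hdl : (x :: (m ++ [y])).dropLast = x :: m := by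
    rw [List.dropLast_cons_of_ne_nil (by simp), List.dropLast_concat]
  rw [tpZS, hgl, hdl]
  simp

theorem tpZS_single (x : Int) :
    tpZS [x] = if x + x == 0 then 1 else 0 := by
  rw [tpZS]
  simp
  split_ifs with h1 <;> simp_all [tpZS]

theorem tpZS_eq : ∀ (n : Nat) (l : List Int), l.length = n → l.Pairwise (· < ·) →
    tpZS l = (((l.filter (fun z => decide ((-z) ∈ l))).length : Nat) : Int) := by
  intro n
  induction n using Nat.strong_induction_on with
  | _ n ih =>
    intro l hn h
    match l with
    | [] => simp [tpZS]
    | x :: m' =>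
      rcases m'.eq_nil_or_concat with rfl | ⟨m, y, rfl⟩
      · -- singleton
        rw [tpZS_single]
        by_cases hx : x = 0
        · subst hx; simp
        · have h1 : ¬(x + x == 0) := by simp; omega
          have h2 : ¬(-x = x) := by omega
          simp [h1, h2]
      · -- l = x :: (m ++ [y])
        simp only [List.concat_eq_append] at hn h ⊢
        rw [tpZS_concat]
        have hxall : ∀ z ∈ m ++ [y], x < z := (List.pairwise_cons.mp h).1
        have hmy : (m ++ [y]).Pairwise (· < ·) := (List.pairwise_cons.mp h).2
        have hxy : x < y := hxall y (by simp)
        have hzy : ∀ z ∈ m, z < y := by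
          intro z hz
          exact (List.pairwise_append.mp hmy).2.2 z hz y (by simp)
        have hxz : ∀ z ∈ m, x < z := fun z hz => hxall z (by simp [hz])
        have hm : m.Pairwise (· < ·) := (List.pairwise_append.mp hmy).1
        have hlen : (x :: (m ++ [y])).length = n := hn
        by_cases hz : x + y = 0
        · have hy : y = -x := by omega
          have e1 : (x + y == 0) = true := by simp [hz]
          rw [e1, if_pos rfl]
          have hIH := ih m.length (by simp at hlen; omega) m rfl hm
          rw [hIH]
          have hpx : (-x ∈ x :: (m ++ [y])) := by
            have : -x = y := by omega
            simp [this]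
          have hpy : (-y ∈ x :: (m ++ [y])) := by
            simp [show -y = x by omega]
          have hcongr : m.filter (fun z => decide ((-z) ∈ x :: (m ++ [y])))
              = m.filter (fun z => decide ((-z) ∈ m)) := by
            apply List.filter_congr
            intro z hzm
            have h1 : -z ≠ x := by have := hzy z hzm; omega
            have h2 : -z ≠ y := by have := hxz z hzm; omega
            simp [h1, h2]
          simp only [List.filter_cons, List.filter_append, hpx, hpy, decide_true,
            if_true, List.length_cons, List.length_append]
          rw [hcongr]
          push_cast
          simp
          omega
        · have e1 : (x + y == 0) = false := by simp [hz]
          rw [e1]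
          simp only [Bool.false_eq_true, if_false]
          by_cases hlt : x + y < 0
          · rw [if_pos hlt]
            have hIH := ih (m ++ [y]).length (by simp at hlen ⊢; omega) (m ++ [y]) rfl hmy
            rw [hIH]
            have hall : ∀ w ∈ x :: (m ++ [y]), w ≤ y := by
              intro w hw
              rcases List.mem_cons.mp hw with rfl | hw'
              · omega
              · rcases List.mem_append.mp hw' with hw2 | hw2
                · exact le_of_lt (hzy w hw2)
                · simp at hw2; omega
            have hpx : ¬(-x ∈ x :: (m ++ [y])) := by
              intro hmem
              have := hall _ hmem
              omega
            have hcongr : (m ++ [y]).filter (fun z => decide ((-z) ∈ x :: (m ++ [y])))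
                = (m ++ [y]).filter (fun z => decide ((-z) ∈ m ++ [y])) := by
              apply List.filter_congr
              intro z hzm
              have hzley : z ≤ y := hall z (by simp [hzm])
              have h1 : -z ≠ x := by omega
              simp [h1]
            simp only [List.filter_cons, hpx, decide_false, Bool.false_eq_true, if_false]
            rw [hcongr]
          · rw [if_neg hlt]
            have hxm : (x :: m).Pairwise (· < ·) := by
              refine List.pairwise_cons.mpr ⟨hxz, hm⟩
            have hIH := ih (x :: m).length (by simp at hlen ⊢; omega) (x :: m) rfl hxm
            rw [hIH]
            have hall : ∀ w ∈ x :: (m ++ [y]), x ≤ w := by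
              intro w hw
              rcases List.mem_cons.mp hw with rfl | hw'
              · omega
              · exact le_of_lt (hxall w hw')
            have hpy : ¬(-y ∈ x :: (m ++ [y])) := by
              intro hmem
              have := hall _ hmem
              omega
            have hcongr : (x :: m).filter (fun z => decide ((-z) ∈ x :: (m ++ [y])))
                = (x :: m).filter (fun z => decide ((-z) ∈ x :: m)) := by
              apply List.filter_congr
              intro z hzm
              have hxlez : x ≤ z := by
                rcases List.mem_cons.mp hzm with rfl | hzm'
                · omega
                · exact le_of_lt (hxz z hzm')
              have h1 : -z ≠ y := by omega
              have h2 : ((-z) ∈ x :: (m ++ [y])) ↔ ((-z) ∈ x :: m) := by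
                simp [h1]
              simp [h2]
            have hsplit : (x :: (m ++ [y])) = (x :: m) ++ [y] := by simp
            rw [hsplit]
            simp only [List.filter_append]
            rw [show ([y].filter (fun z => decide ((-z) ∈ (x :: m) ++ [y]))) = [] from by
              simp only [List.filter_cons, List.filter_nil]
              have h5 : ¬(-y ∈ (x :: m) ++ [y]) := by simpa using hpy
              simp only [List.mem_append, List.mem_cons, not_or] at h5
              simp [h5.1, h5.2]]
            rw [show ((x :: m).filter (fun z => decide ((-z) ∈ (x :: m) ++ [y])))
                = (x :: m).filter (fun z => decide ((-z) ∈ x :: (m ++ [y]))) from by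
              apply List.filter_congr; intro z _; simp]
            rw [hcongr]
            simp

theorem counts_eq_ofList' (nums : List Int) :
    nums.foldl (fun counts number =>
      if PySem.Set.contains counts number then counts
      else PySem.Set.add counts number) PySem.Set.empty = PySem.Set.ofList nums := by
  rw [counts_eq_ofList, PySem.Set.ofList_eq_foldl]
  rfl

-- ===== VERDICT (by name: the statement is the Claim_ definition above) =====
theorem zeroSumContinued_spec : Claim_equal_zeroSumContinued := by
  intro nums _
  unfold Spec_zeroSumContinued zeroSumContinued zeroSumContinued_alt
  simp only [counts_eq_ofList', count_loop, zero_add]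
  set s := PySem.Set.ofList nums with hs
  set l := PySem.List.sorted s (fun x => x) false with hl
  have hperm : l.Perm s := PySem.List.sorted_perm s (fun x => x) false
  have hloop : tpLoop l 0 (PySem.List.len l - 1) 0 = tpZS l := by
    rw [PySem.List.len_eq,
        tpLoop_eq l l.length 0 ((l.length : Int) - 1) 0 (by omega) (by omega) (by omega)]
    rw [show (((l.length : Int) - 1) - 0 + 1).toNat = l.length from by omega]
    simp
  rw [hloop, tpZS_eq l.length l rfl (PySem.List.sorted_ofList_pairwise_lt nums)]
  have h1 : l.filter (fun z => decide ((-z) ∈ l)) = l.filter (fun z => decide ((-z) ∈ s)) := by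
    apply List.filter_congr
    intro z _
    simp [hperm.mem_iff]
  have h2 : s.filter (fun u => PySem.Set.contains s (u * -1))
      = s.filter (fun z => decide ((-z) ∈ s)) := by
    apply List.filter_congr
    intro z _
    simp [PySem.Set.contains]
  rw [h1, h2, (hperm.filter _).length_eq]
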